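-- pv_equiv track=rewrite | github.com/0x647262/aoc | 2015/python/02/i_was_told_there_would_be_no_math/__init__.py | part2
-- ===== SOURCE A (Python) =====
-- from math import prod
--
-- def part2(measurements: list):
--     '''
--     --- Part Two ---
--
--     The elves are also running low on ribbon. Ribbon is all the same width, so
--     they only have to worry about the length they need to order, which they
--     would again like to be exact.
--
--     The ribbon required to wrap a present is the shortest distance around its
--     sides, or the smallest perimeter of any one face. Each present also
--     requires a bow made out of ribbon as well; the feet of ribbon required for
--     the perfect bow is equal to the cubic feet of volume of the present. Don't
--     ask how they tie the bow, though; they'll never tell.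
--
--     For example:
--
--         - A present with dimensions 2x3x4 requires 2+2+3+3 = 10 feet of ribbon
--           to wrap the present plus 2*3*4 = 24 feet of ribbon for the bow, for a
--           total of 34 feet.
--         - A present with dimensions 1x1x10 requires 1+1+1+1 = 4 feet of ribbon
--           to wrap the present plus 1*1*10 = 10 feet of ribbon for the bow, for
--           a total of 14 feet.
--
--     How many total feet of ribbon should they order?
--     '''
--     ribbon_required = 0
--     for measurement in measurements:
--         dimensions = sorted([int(d) for d in measurement.split('x')])
--         perimiter_ribbon = sum(dimensions[0:2]) * 2
--         volume_ribbon = prod(dimensions)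
--
--         ribbon_required += perimiter_ribbon + volume_ribbon
--
--     return ribbon_required
-- ===== SOURCE B (Python) =====
-- def part2(measurements: list):
--     total = 0
--     for measurement in measurements:
--         volume = 1
--         s1 = s2 = None  # two smallest values seen so far (s1 <= s2)
--         for token in measurement.split('x'):
--             v = int(token)
--             volume *= v
--             if s1 is None or v < s1:
--                 s1, s2 = v, s1
--             elif s2 is None or v < s2:
--                 s2 = v
--         wrap = s1 if s2 is None else s1 + s2
--         total += 2 * wrap + volume
--     return total
-- ===== Notes on version B (the rewrite author's own statement) =====
-- stated objective: alternative
-- what changed: Replaces A's sort-then-slice selection of the two smallest dimensions with a single one-pass scan that tracks the two smallest values (and the product) directly, so no sorted copy is built.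
import Mathlib
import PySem

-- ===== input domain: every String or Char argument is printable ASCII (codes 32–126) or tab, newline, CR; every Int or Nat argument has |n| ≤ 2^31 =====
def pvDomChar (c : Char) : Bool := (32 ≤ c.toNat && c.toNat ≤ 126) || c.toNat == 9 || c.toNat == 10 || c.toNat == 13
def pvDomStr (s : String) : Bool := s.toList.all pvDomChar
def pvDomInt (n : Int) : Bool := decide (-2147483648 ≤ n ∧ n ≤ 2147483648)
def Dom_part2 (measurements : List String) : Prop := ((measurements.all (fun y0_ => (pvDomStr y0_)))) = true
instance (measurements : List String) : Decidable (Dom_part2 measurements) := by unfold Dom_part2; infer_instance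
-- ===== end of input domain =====

-- B replaces A's sort-then-slice selection of the two smallest dimensions by a
-- one-pass scan that tracks the two smallest values (and the product) directly.

-- ===== PORT A =====
-- int(d): Pre_part2 guarantees ofStr? is some; the getD 0 default is never used there.
def part2 (measurements : List String) : Int :=
  measurements.foldl
    (fun ribbon_required measurement =>
      let dimensions :=
        PySem.List.sorted
          (((PySem.Str.split? measurement "x").getD []).map
            (fun d => (PySem.Int.ofStr? d).getD 0))
          (fun x => x)
      let perimiter_ribbon := (PySem.List.slice dimensions (some 0) (some 2)).sum * 2
      let volume_ribbon := dimensions.prod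
      ribbon_required + (perimiter_ribbon + volume_ribbon))
    0

-- ===== PORT B =====
-- the two branched updates of (s1, s2) in Source B's inner loop
def part2Step (s : Option Int × Option Int) (v : Int) : Option Int × Option Int :=
  match s with
  | (none, _) => (some v, none)
  | (some a, s2) =>
    if v < a then (some v, some a)
    else
      match s2 with
      | none => (some a, some v)
      | some b => if v < b then (some a, some v) else (some a, some b)

def part2_alt (measurements : List String) : Int :=
  measurements.foldl
    (fun total measurement =>
      let st :=
        ((PySem.Str.split? measurement "x").getD []).foldl
          (fun (s : Int × Option Int × Option Int) token =>
            let v := (PySem.Int.ofStr? token).getD 0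
            (s.1 * v, part2Step s.2 v))
          (1, none, none)
      let wrap := match st.2.2 with
        | none => st.2.1.getD 0
        | some b => st.2.1.getD 0 + b
      total + (2 * wrap + st.1))
    0

-- ===== PRECONDITION & SPEC =====
-- Pre_: every 'x'-separated token of every measurement parses with int();
-- elsewhere the Python A raises ValueError and returns nothing.
def Pre_part2 (measurements : List String) : Prop :=
  ∀ m ∈ measurements, ∀ d ∈ (PySem.Str.split? m "x").getD [],
    (PySem.Int.ofStr? d).isSome = true
instance (measurements : List String) : Decidable (Pre_part2 measurements) := by
  unfold Pre_part2; infer_instance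

def pvWitness_part2 : List String := ["2x3x4", "1x1x10"]

def Spec_part2 (measurements : List String) (out : Int) : Prop := out = part2_alt measurements
instance (measurements : List String) (out : Int) : Decidable (Spec_part2 measurements out) := by unfold Spec_part2; infer_instance

-- ===== CLAIM (what is proved, stated in full; the proofs are below) =====
def Claim_equal_part2 : Prop := ∀ (measurements : List String), Dom_part2 measurements → Pre_part2 measurements → Spec_part2 measurements (part2 measurements)

-- ===== LEMMAS AND PROOFS =====

-- the (s1, s2) pair encoded by the first two elements of a list
def pairOf : List Int → Option Int × Option Int
  | [] => (none, none)
  | [a] => (some a, none)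
  | a :: b :: _ => (some a, some b)

theorem pairOf_take_insertBy (s : List Int) (v : Int) :
    pairOf ((PySem.List.insertBy (fun a b => decide (a < b)) v s).take 2)
      = part2Step (pairOf (s.take 2)) v := by
  match s with
  | [] => simp [PySem.List.insertBy, pairOf, part2Step]
  | [a] =>
    by_cases h : v < a <;>
      simp [PySem.List.insertBy, pairOf, part2Step, h]
  | a :: b :: rest =>
    by_cases h1 : v < a
    · simp [PySem.List.insertBy, pairOf, part2Step, h1]
    · by_cases h2 : v < b <;>
        simp [PySem.List.insertBy, pairOf, part2Step, h1, h2]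

theorem foldl_part2Step (l : List Int) :
    l.foldl part2Step (none, none)
      = pairOf ((PySem.List.sorted l (fun x => x)).take 2) := by
  induction l using List.reverseRecOn with
  | nil => simp [PySem.List.sorted, pairOf]
  | append_singleton l v ih =>
    rw [List.foldl_append, List.foldl_cons, List.foldl_nil, ih,
      PySem.List.sorted_eq_foldl_insertBy l, PySem.List.sorted_eq_foldl_insertBy (l ++ [v]),
      List.foldl_append, List.foldl_cons, List.foldl_nil,
      ← PySem.List.sorted_eq_foldl_insertBy l, pairOf_take_insertBy]

-- B's wrap of the tracked pair = sum of the first two elements of the sorted list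
theorem wrap_eq_sum_take (t : List Int) :
    (match (pairOf (t.take 2)).2 with
      | none => (pairOf (t.take 2)).1.getD 0
      | some b => (pairOf (t.take 2)).1.getD 0 + b) = (t.take 2).sum := by
  match t with
  | [] => simp [pairOf]
  | [a] => simp [pairOf]
  | a :: b :: r => simp [pairOf]

-- per-measurement equality of the two loop bodies
theorem body_eq (acc : Int) (m : String) :
    (fun ribbon_required measurement =>
      let dimensions :=
        PySem.List.sorted
          (((PySem.Str.split? measurement "x").getD []).map
            (fun d => (PySem.Int.ofStr? d).getD 0))
          (fun x => x)
      let perimiter_ribbon := (PySem.List.slice dimensions (some 0) (some 2)).sum * 2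
      let volume_ribbon := dimensions.prod
      ribbon_required + (perimiter_ribbon + volume_ribbon)) acc m
    =
    (fun total measurement =>
      let st :=
        ((PySem.Str.split? measurement "x").getD []).foldl
          (fun (s : Int × Option Int × Option Int) token =>
            let v := (PySem.Int.ofStr? token).getD 0
            (s.1 * v, part2Step s.2 v))
          (1, none, none)
      let wrap := match st.2.2 with
        | none => st.2.1.getD 0
        | some b => st.2.1.getD 0 + b
      total + (2 * wrap + st.1)) acc m := by
  simp only
  set toks := (PySem.Str.split? m "x").getD [] with htoks
  set dims := toks.map (fun d => (PySem.Int.ofStr? d).getD 0) with hdims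
  -- split B's combined fold into a product fold and a two-smallest fold
  rw [PySem.List.foldl_prod_mk
        (f := fun (acc : Int) token => acc * (PySem.Int.ofStr? token).getD 0)
        (g := fun s token => part2Step s ((PySem.Int.ofStr? token).getD 0))]
  have hprod : toks.foldl (fun (acc : Int) token => acc * (PySem.Int.ofStr? token).getD 0) 1
      = dims.prod := by
    rw [hdims, List.prod_eq_foldl, List.foldl_map]
  have hpair : toks.foldl (fun s token => part2Step s ((PySem.Int.ofStr? token).getD 0)) (none, none)
      = pairOf ((PySem.List.sorted dims (fun x => x)).take 2) := by
    rw [hdims, ← foldl_part2Step, List.foldl_map]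
  rw [hprod, hpair]
  have hslice : PySem.List.slice (PySem.List.sorted dims (fun x => x)) (some 0) (some 2)
      = (PySem.List.sorted dims (fun x => x)).take 2 := by
    rw [PySem.List.slice_toNat _ (by norm_num) (by norm_num)]
    simp
  have hperm := PySem.List.sorted_perm dims (fun x => x) false
  rw [hslice, hperm.prod_eq, wrap_eq_sum_take]
  ring

-- ===== VERDICT (by name: the statement is the Claim_ definition above) =====
theorem part2_spec : Claim_equal_part2 := by
  intro measurements _ _
  unfold Spec_part2 part2 part2_alt
  congr 1
  funext a m
  exact body_eq a m
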